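-- pv_equiv track=rewrite | github.com/MartinToudal/tribunetour-mvp | scripts/generate-france-league-pack.py | split_wikitable_rows
-- ===== SOURCE A (Python) =====
-- def split_wikitable_rows(table_text: str):
--     rows = []
--     current = []
--
--     for raw_line in table_text.splitlines():
--         line = raw_line.rstrip()
--         if line.startswith("|-"):
--             if current:
--                 rows.append(current)
--                 current = []
--             continue
--         if line.startswith("!"):
--             continue
--         if not line.startswith("|"):
--             continue
--         payload = line[1:]
--         parts = [part.strip() for part in payload.split("||")]
--         current.extend(parts)
--
--     if current:
--         rows.append(current)
--
--     return rows
-- ===== SOURCE B (Python) =====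
-- def _line_cells(line):
--     if line.startswith("|"):
--         return [part.strip() for part in line[1:].split("||")]
--     return []
--
--
-- def _group_cells(group):
--     out = []
--     for line in group:
--         out.extend(_line_cells(line))
--     return out
--
--
-- def split_wikitable_rows(table_text: str):
--     # phase 1: partition rstripped lines into groups separated by '|-' lines
--     lines = [raw.rstrip() for raw in table_text.splitlines()]
--     groups = []
--     g = []
--     for line in lines:
--         if line.startswith("|-"):
--             groups.append(g)
--             g = []
--         else:
--             g.append(line)
--     groups.append(g)
--     # phase 2: map each group to its flattened cell list, keep the non-empty ones
--     rows = [_group_cells(grp) for grp in groups]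
--     return [r for r in rows if r]
-- ===== Notes on version B (the rewrite author's own statement) =====
-- stated objective: alternative
-- what changed: Replaces A's single stateful loop (rows/current with in-loop flushes) by a two-phase pipeline: first partition the rstripped lines into separator-delimited groups, then map each group to its flattened cell list and keep the non-empty ones.
import Mathlib
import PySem

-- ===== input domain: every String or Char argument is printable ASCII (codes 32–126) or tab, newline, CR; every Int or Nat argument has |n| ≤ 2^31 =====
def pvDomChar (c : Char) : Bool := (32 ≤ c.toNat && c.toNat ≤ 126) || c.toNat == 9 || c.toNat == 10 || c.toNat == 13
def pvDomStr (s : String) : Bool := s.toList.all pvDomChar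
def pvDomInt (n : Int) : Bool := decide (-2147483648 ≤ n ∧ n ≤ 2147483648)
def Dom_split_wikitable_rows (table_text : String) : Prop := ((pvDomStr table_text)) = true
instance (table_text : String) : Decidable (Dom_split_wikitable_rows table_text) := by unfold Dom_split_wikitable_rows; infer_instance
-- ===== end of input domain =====

-- B differs from A by decomposition only (partition lines into groups, then map groups to cell lists); same O(n) cost.

-- ===== PORT A =====
-- one loop step of A, on the raw line (rstrip inside, as in A)
def pvStepA (st : List (List String) × List String) (raw_line : String) :
    List (List String) × List String :=
  let line := PySem.Str.rstrip raw_line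
  if PySem.Str.startswith line "|-" then
    (if st.2 ≠ [] then (st.1 ++ [st.2], ([] : List String)) else st)
  else if PySem.Str.startswith line "!" then st
  else if !PySem.Str.startswith line "|" then st
  else
    let payload := PySem.Str.slice line (some 1) none
    let parts := ((PySem.Str.split? payload "||").getD []).map PySem.Str.strip
    (st.1, st.2 ++ parts)

def split_wikitable_rows (table_text : String) : List (List String) :=
  let st := (PySem.Str.splitlines table_text).foldl pvStepA ([], [])
  if st.2 ≠ [] then st.1 ++ [st.2] else st.1

-- ===== PORT B =====
def pvLineCells (line : String) : List String :=
  if PySem.Str.startswith line "|" then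
    ((PySem.Str.split? (PySem.Str.slice line (some 1) none) "||").getD []).map PySem.Str.strip
  else []

-- Source B's _group_cells: out = []; extend per line
def pvGroupCells (group : List String) : List String :=
  group.foldl (fun out line => out ++ pvLineCells line) []

-- Source B's grouping step
def pvStepB (st : List (List String) × List String) (line : String) :
    List (List String) × List String :=
  if PySem.Str.startswith line "|-" then (st.1 ++ [st.2], []) else (st.1, st.2 ++ [line])

def split_wikitable_rows_alt (table_text : String) : List (List String) :=
  let lines := (PySem.Str.splitlines table_text).map PySem.Str.rstrip
  let st := lines.foldl pvStepB ([], [])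
  let groups := st.1 ++ [st.2]
  let rows := groups.map pvGroupCells
  rows.filter (fun r => !r.isEmpty)

-- ===== PRECONDITION & SPEC =====
def Spec_split_wikitable_rows (table_text : String) (out : List (List String)) : Prop := out = split_wikitable_rows_alt table_text
instance (table_text : String) (out : List (List String)) : Decidable (Spec_split_wikitable_rows table_text out) := by unfold Spec_split_wikitable_rows; infer_instance

-- ===== CLAIM (what is proved, stated in full; the proofs are below) =====
def Claim_equal_split_wikitable_rows : Prop := ∀ (table_text : String), Dom_split_wikitable_rows table_text → Spec_split_wikitable_rows table_text (split_wikitable_rows table_text)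

-- ===== LEMMAS AND PROOFS =====

-- prepend extra cells/lines onto the first block of a block list
def pvPrepend (g : List String) : List (List String) → List (List String)
  | [] => [g]
  | h :: t => (g ++ h) :: t

-- recursive characterisation of B's grouping (the list of separator-delimited groups)
def pvGroups : List String → List (List String)
  | [] => [[]]
  | l :: ls =>
    if PySem.Str.startswith l "|-" then [] :: pvGroups ls
    else pvPrepend [l] (pvGroups ls)

lemma pvGroups_ne_nil (ls : List String) : pvGroups ls ≠ [] := by
  cases ls with
  | nil => simp [pvGroups]
  | cons l ls =>
    simp only [pvGroups]
    split
    · simp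
    · cases pvGroups ls <;> simp [pvPrepend]

lemma pvPrepend_pvPrepend (c x : List String) (gs : List (List String)) :
    pvPrepend c (pvPrepend x gs) = pvPrepend (c ++ x) gs := by
  cases gs <;> simp [pvPrepend]

lemma pvPrepend_nil (xs : List (List String)) (h : xs ≠ []) : pvPrepend [] xs = xs := by
  cases xs with
  | nil => exact absurd rfl h
  | cons a t => simp [pvPrepend]

lemma foldB_eq (ls : List String) : ∀ gs g,
    (let st := ls.foldl pvStepB (gs, g); st.1 ++ [st.2]) = gs ++ pvPrepend g (pvGroups ls) := by
  induction ls with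
  | nil => intro gs g; simp [pvGroups, pvPrepend]
  | cons l ls ih =>
    intro gs g
    simp only [List.foldl_cons, pvStepB, pvGroups]
    by_cases h : PySem.Str.startswith l "|-" = true
    · simp only [h, if_true, ih]
      cases hg : pvGroups ls with
      | nil => exact absurd hg (pvGroups_ne_nil ls)
      | cons a t => simp [pvPrepend]
    · simp only [h, if_false, ih, Bool.false_eq_true]
      rw [pvPrepend_pvPrepend]

lemma startswith_bang_not_pipe (l : String) (h : PySem.Str.startswith l "!" = true) :
    PySem.Str.startswith l "|" = false := by
  rw [PySem.Str.startswith_eq] at *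
  rw [PySem.Chars.startswith_iff] at h
  by_contra hp
  rw [Bool.not_eq_false, PySem.Chars.startswith_iff] at hp
  rcases h with ⟨t1, h1⟩
  rcases hp with ⟨t2, h2⟩
  have := h1.trans h2.symm
  simp at this

-- cells added by one rstripped line in A's content branches, all three cases
lemma stepA_content (st : List (List String) × List String) (l : String)
    (hsep : PySem.Str.startswith (PySem.Str.rstrip l) "|-" = false) :
    pvStepA st l = (st.1, st.2 ++ pvLineCells (PySem.Str.rstrip l)) := by
  obtain ⟨r, c⟩ := st
  simp only [pvStepA, pvLineCells, hsep, Bool.false_eq_true, if_false]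
  by_cases hb : PySem.Str.startswith (PySem.Str.rstrip l) "!" = true
  · simp only [hb, if_true, startswith_bang_not_pipe _ hb, Bool.false_eq_true, if_false,
      List.append_nil]
  · simp only [Bool.not_eq_true] at hb
    simp only [hb, Bool.false_eq_true, if_false]
    by_cases hp : PySem.Str.startswith (PySem.Str.rstrip l) "|" = true
    · simp only [hp, if_true, Bool.not_true, Bool.false_eq_true, if_false]
    · simp only [Bool.not_eq_true] at hp
      simp only [hp, Bool.not_false, if_true, Bool.false_eq_true, if_false, List.append_nil]

lemma groupCells_cons (l : String) (g : List String) :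
    pvGroupCells (l :: g) = pvLineCells l ++ pvGroupCells g := by
  simp only [pvGroupCells, List.foldl_cons, List.nil_append]
  rw [PySem.List.foldl_append_eq_flatMap, PySem.List.foldl_append_eq_flatMap]
  simp

lemma map_cells_pvPrepend_line (l : String) (gs : List (List String)) (h : gs ≠ []) :
    (pvPrepend [l] gs).map pvGroupCells = pvPrepend (pvLineCells l) (gs.map pvGroupCells) := by
  cases gs with
  | nil => exact absurd rfl h
  | cons a t => simp [pvPrepend, groupCells_cons]

-- A's flush of the pending row
def pvFlush (st : List (List String) × List String) : List (List String) :=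
  if st.2 ≠ [] then st.1 ++ [st.2] else st.1

-- the main invariant: A's fold+flush over raw lines equals rows ++ the filtered
-- cell lists of the groups, the first group's cells prefixed by the pending current
lemma foldA_eq (ls : List String) : ∀ rows cur,
    pvFlush (ls.foldl pvStepA (rows, cur))
    = rows ++ (pvPrepend cur ((pvGroups (ls.map PySem.Str.rstrip)).map pvGroupCells)).filter
        (fun r => !r.isEmpty) := by
  induction ls with
  | nil =>
    intro rows cur
    simp only [List.foldl_nil, List.map_nil, pvGroups, List.map_cons, pvGroupCells,
      List.foldl_nil, pvPrepend, pvFlush]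
    by_cases h : cur = []
    · simp [h, List.filter]
    · simp [h, List.filter, List.isEmpty_eq_false_iff.mpr h]
  | cons l ls ih =>
    intro rows cur
    simp only [List.foldl_cons, List.map_cons, pvGroups]
    by_cases hsep : PySem.Str.startswith (PySem.Str.rstrip l) "|-" = true
    · simp only [hsep, if_true]
      have hstep : pvStepA (rows, cur) l =
          (if cur ≠ [] then ((rows ++ [cur] : List (List String)), ([] : List String))
            else (rows, cur)) := by
        simp only [pvStepA, hsep, if_true]
      by_cases hc : cur = []
      · subst hc
        simp only [ne_eq, not_true_eq_false, if_false] at hstep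
        rw [hstep, ih]
        cases hg : pvGroups (ls.map PySem.Str.rstrip) with
        | nil => exact absurd hg (pvGroups_ne_nil _)
        | cons a t => simp [pvPrepend, List.filter, pvGroupCells]
      · simp only [ne_eq, hc, not_false_eq_true, if_true] at hstep
        rw [hstep, ih]
        cases hg : pvGroups (ls.map PySem.Str.rstrip) with
        | nil => exact absurd hg (pvGroups_ne_nil _)
        | cons a t =>
          simp [pvPrepend, List.filter, pvGroupCells,
            List.isEmpty_eq_false_iff.mpr hc, List.append_assoc]
    · simp only [Bool.not_eq_true] at hsep
      simp only [hsep, Bool.false_eq_true, if_false]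
      rw [stepA_content (rows, cur) l hsep, ih,
        map_cells_pvPrepend_line _ _ (pvGroups_ne_nil _),
        pvPrepend_pvPrepend]

lemma pvGroups_map_ne_nil (ls : List String) : (pvGroups ls).map pvGroupCells ≠ [] := by
  simp [pvGroups_ne_nil ls]

-- ===== VERDICT (by name: the statement is the Claim_ definition above) =====
theorem split_wikitable_rows_spec : Claim_equal_split_wikitable_rows := by
  intro t _
  show split_wikitable_rows t = split_wikitable_rows_alt t
  have hA : split_wikitable_rows t
      = pvFlush ((PySem.Str.splitlines t).foldl pvStepA ([], [])) := rfl
  rw [hA, foldA_eq (PySem.Str.splitlines t) [] []]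
  have hB := foldB_eq ((PySem.Str.splitlines t).map PySem.Str.rstrip) [] []
  simp only [List.nil_append] at hB ⊢
  show _ = List.filter (fun r => !r.isEmpty) (List.map pvGroupCells
    ((((PySem.Str.splitlines t).map PySem.Str.rstrip).foldl pvStepB ([], [])).1 ++
      [(((PySem.Str.splitlines t).map PySem.Str.rstrip).foldl pvStepB ([], [])).2]))
  rw [hB,
    pvPrepend_nil ((pvGroups ((PySem.Str.splitlines t).map PySem.Str.rstrip)).map pvGroupCells)
      (pvGroups_map_ne_nil _),
    pvPrepend_nil (pvGroups ((PySem.Str.splitlines t).map PySem.Str.rstrip))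
      (pvGroups_ne_nil _)]
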